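-- pv_equiv track=rewrite | github.com/memolya/Python_pro | 2.1.5_filter_anagrams.py | filter_anagrams
-- ===== SOURCE A (Python) =====
-- from collections import Counter
--
-- def filter_anagrams(word, words):
--     word_counter = Counter(word)  # Считаем буквы в исходном слове
--     list_anagrams = []
--
--     for wd in words:
--         wd_set = set(wd)
--         if Counter(wd) == word_counter:
--             list_anagrams.append(wd)
--     return list_anagrams
-- ===== SOURCE B (Python) =====
-- def filter_anagrams(word, words):
--     result = []
--     n = len(word)
--     for wd in words:
--         if len(wd) != n:
--             continue
--         pool = list(word)
--         ok = True
--         for ch in wd: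
--             if ch in pool:
--                 pool.remove(ch)
--             else:
--                 ok = False
--                 break
--         if ok:
--             result.append(wd)
--     return result
-- ===== Notes on version B (the rewrite author's own statement) =====
-- stated objective: alternative
-- what changed: Replaces the per-word Counter-equality (frequency-map) test with a length pre-filter plus destructive letter-removal matching: each surviving candidate's letters are removed one by one from a mutable copy of the target's letters, a failed removal disqualifying it; no counters or maps are built.
import Mathlib
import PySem

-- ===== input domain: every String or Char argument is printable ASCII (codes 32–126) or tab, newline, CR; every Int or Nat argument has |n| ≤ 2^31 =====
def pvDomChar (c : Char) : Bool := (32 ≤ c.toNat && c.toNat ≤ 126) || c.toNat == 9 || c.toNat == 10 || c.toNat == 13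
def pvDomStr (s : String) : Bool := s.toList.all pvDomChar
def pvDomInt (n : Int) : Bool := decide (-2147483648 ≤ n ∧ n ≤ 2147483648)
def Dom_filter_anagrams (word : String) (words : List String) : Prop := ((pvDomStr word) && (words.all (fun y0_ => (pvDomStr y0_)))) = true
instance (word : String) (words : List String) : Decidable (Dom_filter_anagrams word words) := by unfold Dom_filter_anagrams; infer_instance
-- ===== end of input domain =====

-- B replaces the per-word Counter-equality test with a length pre-filter plus destructive
-- letter-removal matching against a mutable copy of the target's letters (a different
-- algorithm; a timing run measured B faster on the generated inputs).


-- ===== PORT A =====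
-- Python dict equality for Counters (same keys, same values): every item of each dict is
-- matched by the other.  Exact for counters, whose stored counts are always ≥ 1, so the
-- default 0 can never fake a match.
def counterEq (d1 d2 : PySem.Dict Char Int) : Bool :=
  d1.items.all (fun kv => d2.getD kv.1 0 == kv.2) && d2.items.all (fun kv => d1.getD kv.1 0 == kv.2)

def filter_anagrams (word : String) (words : List String) : List String :=
  let word_counter := PySem.Dict.counter word.toList
  words.foldl (fun list_anagrams wd =>
    let _wd_set := PySem.Set.ofList wd.toList  -- A computes set(wd) and never uses it
    if counterEq (PySem.Dict.counter wd.toList) word_counter then list_anagrams ++ [wd]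
    else list_anagrams) []

-- ===== PORT B =====
-- the inner for/else loop of B: remove each letter of cs from pool; False on a failed removal
-- ('ch in pool' then 'pool.remove(ch)' = List.erase of the first occurrence, exact here)
def consumeAll : List Char → List Char → Bool
  | _, [] => true
  | pool, c :: cs => if pool.contains c then consumeAll (pool.erase c) cs else false

def filter_anagrams_alt (word : String) (words : List String) : List String :=
  let n := word.toList.length
  words.foldl (fun result wd =>
    if wd.toList.length ≠ n then result        -- continue
    else if consumeAll word.toList wd.toList then result ++ [wd]
    else result) []

-- ===== PRECONDITION & SPEC =====
def Spec_filter_anagrams (word : String) (words : List String) (out : List String) : Prop := out = filter_anagrams_alt word words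
instance (word : String) (words : List String) (out : List String) : Decidable (Spec_filter_anagrams word words out) := by unfold Spec_filter_anagrams; infer_instance

-- ===== CLAIM =====
def Claim_equal_filter_anagrams : Prop := ∀ (word : String) (words : List String), Dom_filter_anagrams word words → Spec_filter_anagrams word words (filter_anagrams word words)

-- ===== LEMMAS AND PROOFS =====

-- Counter equality is permutation of the underlying character lists.
theorem counterEq_iff_perm (l1 l2 : List Char) :
    counterEq (PySem.Dict.counter l1) (PySem.Dict.counter l2) = true ↔ l1.Perm l2 := by
  simp only [counterEq, PySem.Dict.items_counter, PySem.Dict.getD_counter,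
    List.all_map, List.all_eq_true, Bool.and_eq_true, beq_iff_eq, Function.comp]
  constructor
  · rintro ⟨h1, h2⟩
    refine List.perm_iff_count.mpr (fun c => ?_)
    by_cases hc1 : c ∈ l1
    · have := h1 c ((PySem.Set.mem_ofList l1 c).mpr hc1)
      exact_mod_cast this.symm
    · by_cases hc2 : c ∈ l2
      · have := h2 c ((PySem.Set.mem_ofList l2 c).mpr hc2)
        exact_mod_cast this
      · rw [List.count_eq_zero_of_not_mem hc1, List.count_eq_zero_of_not_mem hc2]
  · intro hp
    have hc := List.perm_iff_count.mp hp
    exact ⟨fun k _ => by exact_mod_cast (hc k).symm, fun k _ => by exact_mod_cast hc k⟩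

-- The removal loop succeeds exactly when cs is a sub-multiset of pool.
theorem consumeAll_iff (cs pool : List Char) :
    consumeAll pool cs = true ↔ ∀ a, cs.count a ≤ pool.count a := by
  induction cs generalizing pool with
  | nil => simp [consumeAll]
  | cons c cs ih =>
    simp only [consumeAll]
    by_cases hc : c ∈ pool
    · have hpos : 0 < pool.count c := List.count_pos_iff.mpr hc
      simp only [List.contains_iff_mem.mpr hc, if_true, ih]
      constructor
      · intro h a
        have h2 := h a
        simp only [List.count_erase] at h2
        simp only [List.count_cons]
        by_cases hac : a = c
        · subst hac; simp at h2 ⊢; omega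
        · have hca : ¬ c = a := fun h' => hac h'.symm
          simp [hca] at h2 ⊢; omega
      · intro h a
        have h2 := h a
        simp only [List.count_cons] at h2
        simp only [List.count_erase]
        by_cases hac : a = c
        · subst hac; simp at h2 ⊢; omega
        · have hca : ¬ c = a := fun h' => hac h'.symm
          simp [hca] at h2 ⊢; omega
    · have hfalse : pool.contains c = false := by simp [hc]
      refine iff_of_false (by rw [hfalse]; simp) ?_
      intro h
      have hle := h c
      rw [List.count_eq_zero_of_not_mem hc] at hle
      simp [List.count_cons_self] at hle

-- B's combined test equals the anagram (permutation) test.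
theorem b_test_iff_perm (wd word : List Char) :
    (wd.length = word.length ∧ consumeAll word wd = true) ↔ wd.Perm word := by
  rw [consumeAll_iff]
  constructor
  · rintro ⟨hlen, hle⟩
    exact (List.subperm_ext_iff.mpr (fun a _ => hle a)).perm_of_length_le (le_of_eq hlen.symm)
  · intro hp
    exact ⟨hp.length_eq, fun a => le_of_eq (List.perm_iff_count.mp hp a)⟩

-- ===== VERDICT =====
theorem filter_anagrams_spec : Claim_equal_filter_anagrams := by
  intro word words _
  show filter_anagrams word words = filter_anagrams_alt word words
  unfold filter_anagrams filter_anagrams_alt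
  dsimp only
  have hA := PySem.List.foldl_append_if
        (fun wd : String => counterEq (PySem.Dict.counter wd.toList) (PySem.Dict.counter word.toList))
        (fun wd : String => wd) words []
  have hB := PySem.List.foldl_append_if
        (fun wd : String => !(wd.toList.length ≠ word.toList.length : Bool) && consumeAll word.toList wd.toList)
        (fun wd : String => wd) words []
  simp only [List.map_id'] at hA hB
  have hstep : (fun (result : List String) (wd : String) =>
      if wd.toList.length ≠ word.toList.length then result
      else if consumeAll word.toList wd.toList then result ++ [wd] else result)
      = (fun (result : List String) (wd : String) =>
        if (!(wd.toList.length ≠ word.toList.length : Bool) && consumeAll word.toList wd.toList) = true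
        then result ++ [wd] else result) := by
    funext result wd
    by_cases h1 : wd.toList.length = word.toList.length <;>
      by_cases h2 : consumeAll word.toList wd.toList = true <;>
      simp [h1, h2]
  rw [hA, hstep, hB, List.nil_append, List.nil_append]
  refine List.filter_congr (fun wd _ => ?_)
  rw [Bool.eq_iff_iff]
  simp only [Bool.and_eq_true, Bool.not_eq_true', decide_eq_false_iff_not, ne_eq, not_not,
    counterEq_iff_perm, ← b_test_iff_perm wd.toList word.toList]
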